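-- pv_equiv track=rewrite | github.com/cdeross/code-wars-solutions-python | 7 kyu - Parts of a list.py | partlist
-- ===== SOURCE A (Python) =====
-- def partlist(arr):
--     output = []
--     for i, j in enumerate(arr):
--         if i == len(arr)-1:
--             break
--         else:
--             output.append((" ".join(arr[:i+1]), " ".join(arr[i+1:])))
--     return output
-- ===== SOURCE B (Python) =====
-- def partlist(arr):
--     n = len(arr)
--     if n < 2:
--         return []
--     first = arr[0]
--     last = arr[n - 1]
--     mid = arr[1:n - 1]
--     prefixes = [first]
--     acc = first
--     for x in mid:
--         acc = acc + " " + x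
--         prefixes.append(acc)
--     suffixes = [last]
--     acc = last
--     for x in reversed(mid):
--         acc = x + " " + acc
--         suffixes.append(acc)
--     suffixes.reverse()
--     return list(zip(prefixes, suffixes))
-- ===== Notes on version B (the rewrite author's own statement) =====
-- stated objective: alternative
-- what changed: B replaces A's per-split full re-joins of both halves (' '.join(arr[:i+1]) and ' '.join(arr[i+1:]) at every i) by two single accumulator passes that maintain a running prefix string left-to-right and a running suffix string right-to-left, then zips the two lists.
import Mathlib
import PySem

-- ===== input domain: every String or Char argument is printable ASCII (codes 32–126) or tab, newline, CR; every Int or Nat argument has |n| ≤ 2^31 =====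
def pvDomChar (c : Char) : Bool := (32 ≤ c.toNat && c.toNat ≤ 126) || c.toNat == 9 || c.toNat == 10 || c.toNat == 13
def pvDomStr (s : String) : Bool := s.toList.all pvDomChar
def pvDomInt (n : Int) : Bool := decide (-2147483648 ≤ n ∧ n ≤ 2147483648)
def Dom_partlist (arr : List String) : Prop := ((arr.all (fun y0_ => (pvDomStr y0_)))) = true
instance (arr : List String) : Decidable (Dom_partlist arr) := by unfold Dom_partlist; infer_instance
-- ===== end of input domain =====

-- B replaces A's repeated full " ".join re-joins at every split point by two single passes
-- that maintain running prefix/suffix strings and then zips them (objective: alternative decomposition).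

-- ===== PORT A =====
-- loop over enumerate(arr) with the break at i == len(arr)-1
def partlistGoA (arr : List String) : List (Int × String) → List (String × String)
  | [] => []
  | (i, _) :: rest =>
    if i = (arr.length : Int) - 1 then []
    else
      (PySem.Str.join " " (PySem.List.slice arr none (some (i + 1))),
       PySem.Str.join " " (PySem.List.slice arr (some (i + 1)) none)) ::
      partlistGoA arr rest

def partlist (arr : List String) : List (String × String) :=
  partlistGoA arr (PySem.List.enumerate arr)

-- ===== PORT B =====
-- loop bodies of B's two accumulator passes
def pvStepP (st : List String × String) (x : String) : List String × String :=
  let acc := st.2 ++ " " ++ x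
  (st.1 ++ [acc], acc)

def pvStepS (st : List String × String) (x : String) : List String × String :=
  let acc := x ++ " " ++ st.2
  (st.1 ++ [acc], acc)

def partlist_alt (arr : List String) : List (String × String) :=
  let n := arr.length
  if n < 2 then []
  else
    let first := arr.getD 0 ""
    let last := arr.getD (n - 1) ""
    let mid := PySem.List.slice arr (some 1) (some ((n : Int) - 1))
    let p := mid.foldl pvStepP ([first], first)
    let s := mid.reverse.foldl pvStepS ([last], last)
    p.1.zip s.1.reverse

-- ===== PRECONDITION & SPEC =====
def Spec_partlist (arr : List String) (out : List (String × String)) : Prop := out = partlist_alt arr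
instance (arr : List String) (out : List (String × String)) : Decidable (Spec_partlist arr out) := by unfold Spec_partlist; infer_instance

-- ===== CLAIM (what is proved, stated in full; the proofs are below) =====
def Claim_equal_partlist : Prop := ∀ (arr : List String), Dom_partlist arr → Spec_partlist arr (partlist arr)

-- ===== LEMMAS AND PROOFS =====

-- the common canonical value: the list of (join of first i+1, join of the rest) pairs
def pvJ (xs : List String) : String := PySem.Str.join " " xs

def pvPair (arr : List String) (i : Nat) : String × String :=
  (pvJ (arr.take (i + 1)), pvJ (arr.drop (i + 1)))

def pvCanon (arr : List String) : List (String × String) :=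
  (List.range (arr.length - 1)).map (pvPair arr)

-- proof-only recursions describing B's two accumulator loops
def pvPre (acc : String) : List String → List String
  | [] => []
  | x :: xs => (acc ++ " " ++ x) :: pvPre (acc ++ " " ++ x) xs

def pvLastP (acc : String) : List String → String
  | [] => acc
  | x :: xs => pvLastP (acc ++ " " ++ x) xs

def pvSuf (acc : String) : List String → List String
  | [] => []
  | x :: xs => (x ++ " " ++ acc) :: pvSuf (x ++ " " ++ acc) xs

def pvLastS (acc : String) : List String → String
  | [] => acc
  | x :: xs => pvLastS (x ++ " " ++ acc) xs

theorem chars_join_snoc (sep x : List Char) (xs : List (List Char)) (h : xs ≠ []) :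
    PySem.Chars.join sep (xs ++ [x]) = PySem.Chars.join sep xs ++ sep ++ x := by
  induction xs with
  | nil => exact absurd rfl h
  | cons a ys ih =>
    cases ys with
    | nil =>
      simp [PySem.Chars.join_cons_cons, PySem.Chars.join_singleton]
    | cons b zs =>
      have := ih (by simp)
      simp only [List.cons_append, PySem.Chars.join_cons_cons] at this ⊢
      rw [this]
      simp [List.append_assoc]

theorem pvJ_snoc (xs : List String) (x : String) (h : xs ≠ []) :
    pvJ (xs ++ [x]) = pvJ xs ++ " " ++ x := by
  rw [← String.toList_inj]
  simp only [pvJ, PySem.Str.toList_join, String.toList_append, List.map_append, List.map_cons,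
    List.map_nil]
  exact chars_join_snoc _ _ _ (by simpa using h)

theorem pvJ_cons (x : String) (xs : List String) (h : xs ≠ []) :
    pvJ (x :: xs) = x ++ " " ++ pvJ xs := by
  cases xs with
  | nil => exact absurd rfl h
  | cons b ys =>
    rw [← String.toList_inj]
    simp only [pvJ, PySem.Str.toList_join, String.toList_append, List.map_cons]
    rw [PySem.Chars.join_cons_cons]

theorem pvJ_single (x : String) : pvJ [x] = x := by
  rw [← String.toList_inj]
  simp [pvJ, PySem.Str.toList_join, PySem.Chars.join_singleton]

-- A's loop over enumerate xs k equals the canonical map (break truncates at length-1)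
theorem goA_enum (arr : List String) (xs : List String) :
    ∀ (k : Nat), k + xs.length = arr.length →
      partlistGoA arr (PySem.List.enumerate xs (k : Int)) =
        (List.range (arr.length - 1 - k)).map (fun j => pvPair arr (k + j)) := by
  induction xs with
  | nil =>
    intro k hk
    simp only [List.length_nil] at hk
    have : arr.length - 1 - k = 0 := by omega
    simp [PySem.List.enumerate, partlistGoA, this]
  | cons x rest ih =>
    intro k hk
    simp only [List.length_cons] at hk
    rw [PySem.List.enumerate_cons]
    simp only [partlistGoA]
    by_cases hlast : (k : Int) = (arr.length : Int) - 1
    · have : arr.length - 1 - k = 0 := by omega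
      simp [hlast, this]
    · have hk1 : k < arr.length - 1 := by omega
      have hrange : arr.length - 1 - k = (arr.length - 1 - (k + 1)) + 1 := by omega
      have hcast : (k : Int) + 1 = ((k + 1 : Nat) : Int) := by push_cast; ring
      rw [if_neg hlast, hcast, PySem.List.slice_to_natCast, PySem.List.slice_from_natCast]
      rw [ih (k + 1) (by omega), hrange, List.range_succ_eq_map]
      simp only [List.map_cons, List.map_map]
      refine congrArg₂ List.cons ?_ ?_
      · simp [pvPair, pvJ]
      · refine List.map_congr_left fun j _ => ?_
        simp only [Function.comp]
        congr 1
        omega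

theorem partlist_eq_canon (arr : List String) : partlist arr = pvCanon arr := by
  unfold partlist pvCanon
  rw [show PySem.List.enumerate arr = PySem.List.enumerate arr ((0 : Nat) : Int) from rfl,
    goA_enum arr arr 0 (by omega)]
  simp

-- B's prefix fold in closed form
theorem foldP_eq (m : List String) :
    ∀ (ps : List String) (acc : String),
      m.foldl pvStepP (ps, acc) = (ps ++ pvPre acc m, pvLastP acc m) := by
  induction m with
  | nil => intro ps acc; simp [pvPre, pvLastP]
  | cons x rest ih =>
    intro ps acc
    simp only [List.foldl_cons, pvStepP, pvPre, pvLastP]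
    rw [ih]
    simp

theorem foldS_eq (m : List String) :
    ∀ (ps : List String) (acc : String),
      m.foldl pvStepS (ps, acc) = (ps ++ pvSuf acc m, pvLastS acc m) := by
  induction m with
  | nil => intro ps acc; simp [pvSuf, pvLastS]
  | cons x rest ih =>
    intro ps acc
    simp only [List.foldl_cons, pvStepS, pvSuf, pvLastS]
    rw [ih]
    simp

theorem preLem (arr : List String) :
    ∀ (t k : Nat), 1 ≤ k → k + t ≤ arr.length →
      pvJ (arr.take k) :: pvPre (pvJ (arr.take k)) ((arr.drop k).take t) =
        (List.range (t + 1)).map (fun j => pvJ (arr.take (k + j))) := by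
  intro t
  induction t with
  | zero => intro k _ _; simp [pvPre]
  | succ t ih =>
    intro k hk1 hkt
    have hkL : k < arr.length := by omega
    have hdrop : arr.drop k = arr[k] :: arr.drop (k + 1) := List.drop_eq_getElem_cons hkL
    rw [hdrop]
    simp only [List.take_succ_cons, pvPre]
    have htk : arr.take (k + 1) = arr.take k ++ [arr[k]] := by
      rw [List.take_add_one]; simp [List.getElem?_eq_getElem hkL]
    have hjoin : pvJ (arr.take k) ++ " " ++ arr[k] = pvJ (arr.take (k + 1)) := by
      rw [htk, pvJ_snoc]
      apply List.ne_nil_of_length_pos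
      simp only [List.length_take]
      exact lt_min hk1 (Nat.lt_of_le_of_lt (Nat.zero_le k) hkL)
    rw [hjoin, ih (k + 1) (by omega) (by omega)]
    conv_rhs => rw [List.range_succ_eq_map]
    simp only [List.map_cons, List.map_map]
    refine congrArg₂ List.cons ?_ ?_
    · simp
    · refine List.map_congr_left fun j _ => ?_
      have hx : k + 1 + j = k + (j + 1) := by omega
      simp only [Function.comp, Nat.succ_eq_add_one, hx]

theorem sufLem (arr : List String) :
    ∀ (m : Nat), m + 2 ≤ arr.length →
      pvJ (arr.drop (m + 1)) :: pvSuf (pvJ (arr.drop (m + 1))) (((arr.drop 1).take m).reverse) =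
        (List.range (m + 1)).map (fun t => pvJ (arr.drop (m + 1 - t))) := by
  intro m
  induction m with
  | zero => intro _; simp [pvSuf]
  | succ m ih =>
    intro hm
    have hm1 : m + 1 < arr.length := by omega
    have hget : (arr.drop 1)[m]? = some arr[m + 1] := by
      rw [List.getElem?_drop, show 1 + m = m + 1 by omega]
      exact List.getElem?_eq_getElem hm1
    have htk : (arr.drop 1).take (m + 1) = (arr.drop 1).take m ++ [arr[m + 1]] := by
      rw [List.take_add_one, hget]; rfl
    rw [htk, List.reverse_append]
    simp only [List.reverse_cons, List.reverse_nil, List.nil_append, List.cons_append,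
      List.nil_append, pvSuf]
    have hdrop : arr.drop (m + 1) = arr[m + 1] :: arr.drop (m + 2) := List.drop_eq_getElem_cons hm1
    have hjoin : arr[m + 1] ++ " " ++ pvJ (arr.drop (m + 1 + 1)) = pvJ (arr.drop (m + 1)) := by
      rw [show m + 1 + 1 = m + 2 by omega, hdrop, pvJ_cons]
      apply List.ne_nil_of_length_pos
      simp only [List.length_drop]
      omega
    rw [hjoin, ih (by omega)]
    conv_rhs => rw [List.range_succ_eq_map]
    simp only [List.map_cons, List.map_map]
    refine congrArg₂ List.cons ?_ ?_
    · simp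
    · refine List.map_congr_left fun t _ => ?_
      have hx : m + 1 + 1 - (t + 1) = m + 1 - t := by omega
      simp only [Function.comp, Nat.succ_eq_add_one, hx]

theorem revMap (n : Nat) {α : Type} (g : Nat → α) :
    ((List.range n).map g).reverse = (List.range n).map (fun i => g (n - 1 - i)) := by
  induction n with
  | zero => simp
  | succ n ih =>
    conv_lhs => rw [List.range_succ]
    rw [List.map_append, List.reverse_append]
    simp only [List.map_cons, List.map_nil, List.reverse_cons, List.reverse_nil, List.nil_append,
      List.cons_append]
    rw [ih]
    conv_rhs => rw [List.range_succ_eq_map]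
    simp only [List.map_cons, List.map_map]
    refine congrArg₂ List.cons ?_ ?_
    · have hx : n + 1 - 1 - 0 = n := by omega
      simp only [hx]
    · refine List.map_congr_left fun i _ => ?_
      have hx : n + 1 - 1 - (i + 1) = n - 1 - i := by omega
      simp only [Function.comp, Nat.succ_eq_add_one, hx]

theorem alt_eq_canon (arr : List String) : partlist_alt arr = pvCanon arr := by
  unfold partlist_alt
  by_cases hn : arr.length < 2
  · have : arr.length - 1 = 0 := by omega
    simp [hn, pvCanon, this]
  · simp only [if_neg hn]
    set L := arr.length with hL
    have hL2 : 2 ≤ L := by omega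
    have hmid : PySem.List.slice arr (some 1) (some ((L : Int) - 1)) = (arr.drop 1).take (L - 2) := by
      have : ((L : Int) - 1) = ((L - 1 : Nat) : Int) := by omega
      rw [this, show ((1 : Int)) = ((1 : Nat) : Int) from rfl, PySem.List.slice_natCast]
      congr 1
    have hfirst : arr.getD 0 "" = pvJ (arr.take 1) := by
      have h0 : 0 < arr.length := by omega
      have : arr.take 1 = [arr[0]] := by
        rw [List.take_add_one, List.take_zero, List.getElem?_eq_getElem h0]; rfl
      rw [this, pvJ_single, List.getD_eq_getElem _ _ h0]
    have hlast : arr.getD (L - 1) "" = pvJ (arr.drop (L - 1)) := by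
      have hL1 : L - 1 < arr.length := by omega
      have : arr.drop (L - 1) = [arr[L - 1]] := by
        rw [List.drop_eq_getElem_cons hL1]
        congr 1
        rw [show L - 1 + 1 = arr.length by omega, List.drop_length]
      rw [this, pvJ_single, List.getD_eq_getElem _ _ hL1]
    rw [hmid, hfirst, hlast, foldP_eq, foldS_eq]
    simp only [List.singleton_append]
    have hpre := preLem arr (L - 2) 1 (by omega) (by omega)
    have hsuf := sufLem arr (L - 2) (by omega)
    rw [show L - 2 + 1 = L - 1 by omega] at hpre hsuf
    have hp1 : pvJ (arr.take 1) :: pvPre (pvJ (arr.take 1)) ((arr.drop 1).take (L - 2)) =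
        (List.range (L - 1)).map (fun j => pvJ (arr.take (j + 1))) := by
      rw [hpre]
      refine List.map_congr_left fun j _ => ?_
      rw [Nat.add_comm 1 j]
    have hs1 : pvJ (arr.drop (L - 1)) :: pvSuf (pvJ (arr.drop (L - 1))) (((arr.drop 1).take (L - 2)).reverse) =
        (List.range (L - 1)).map (fun t => pvJ (arr.drop (L - 1 - t))) := hsuf
    rw [hp1, hs1, revMap]
    have hrev : (List.range (L - 1)).map (fun i => pvJ (arr.drop (L - 1 - (L - 1 - 1 - i)))) =
        (List.range (L - 1)).map (fun i => pvJ (arr.drop (i + 1))) := by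
      refine List.map_congr_left fun i hi => ?_
      rw [List.mem_range] at hi
      rw [show L - 1 - (L - 1 - 1 - i) = i + 1 from by omega]
    rw [hrev, List.zip_map']
    rfl

-- ===== VERDICT (by name: the statement is the Claim_ definition above) =====
theorem partlist_spec : Claim_equal_partlist := by
  intro arr _
  unfold Spec_partlist
  rw [partlist_eq_canon, alt_eq_canon]
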